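-- pv_equiv track=rewrite | github.com/CausesHavok/python | minesweeper/minesweeper.py | annotate
-- ===== SOURCE A (Python) =====
-- def annotate(minefield: list[str]):
--     """ Annotates a minefiled for the classic game Mine Sweeper
--     :param minefield: list[str] - a list of rows represented by strings
--     :return: list[str] - an annotated list of rows represented by strings"""
--     if not minefield: return []
--     row_count = len(minefield)
--     column_count = len(minefield[0])
--     annotated_minefield = []
--
--     for row in range(row_count):
--         if column_count != len(minefield[row]):
--             raise ValueError("The board is invalid with current input.")
--
--         row_text = ""
--         for col in range(column_count):
--             minefield_elem = minefield[row][col]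
--             if minefield_elem == "*":
--                 row_text += "*"
--             elif minefield_elem == " ":
--                 bomb_count = count_adjacent_bombs(minefield, row, col)
--                 row_text += str(bomb_count) if bomb_count>0 else " "
--             else:
--                 raise ValueError("The board is invalid with current input.")
--         annotated_minefield.append(row_text)
--
--     return annotated_minefield
--
-- def count_adjacent_bombs(minefield: list[str], i: int, j: int):
--     """Counts bombs adjacent to the input field i,j
--     :param minefield: list[str] - a list of rows represented by strings
--     param i: int - the row number for which the function should compute
--     param j: int - the coloumn number for which the function should compute
--     return: int - the number of bombs in the up to 9 by 9 grid surrounding i,j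
--     """
--     return sum(minefield[i+ii][j+jj] == "*"
--                for ii in [-1, 0, 1]
--                for jj in [-1, 0 ,1]
--                if 0 <= i + ii < len(minefield)
--                if 0 <= j + jj < len(minefield[0]))
-- ===== SOURCE B (Python) =====
-- def annotate(minefield: list[str]):
--     """Annotate a minefield: scatter pass — each bomb increments a counts dict
--     for its in-bounds neighbours; then a second pass renders the board."""
--     if not minefield:
--         return []
--     height = len(minefield)
--     width = len(minefield[0])
--     for row in minefield:
--         if len(row) != width or any(ch != '*' and ch != ' ' for ch in row):
--             raise ValueError("The board is invalid with current input.")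
--     counts = {}
--     for i in range(height):
--         for j in range(width):
--             if minefield[i][j] == '*':
--                 for r in range(max(i - 1, 0), min(i + 2, height)):
--                     for c in range(max(j - 1, 0), min(j + 2, width)):
--                         counts[(r, c)] = counts.get((r, c), 0) + 1
--     result = []
--     for i in range(height):
--         chars = []
--         for j in range(width):
--             if minefield[i][j] == '*':
--                 chars.append('*')
--             else:
--                 n = counts.get((i, j), 0)
--                 chars.append(str(n) if n > 0 else ' ')
--         result.append(''.join(chars))
--     return result
-- ===== Notes on version B (the rewrite author's own statement) =====
-- stated objective: alternative
-- what changed: Replaces A's per-empty-cell gather (a 3x3 neighbour scan for every blank cell) by an up-front validation pass plus a scatter pass: each bomb increments a counts dictionary for its in-bounds neighbours, and a second pass renders the board from that dictionary.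
import Mathlib
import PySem

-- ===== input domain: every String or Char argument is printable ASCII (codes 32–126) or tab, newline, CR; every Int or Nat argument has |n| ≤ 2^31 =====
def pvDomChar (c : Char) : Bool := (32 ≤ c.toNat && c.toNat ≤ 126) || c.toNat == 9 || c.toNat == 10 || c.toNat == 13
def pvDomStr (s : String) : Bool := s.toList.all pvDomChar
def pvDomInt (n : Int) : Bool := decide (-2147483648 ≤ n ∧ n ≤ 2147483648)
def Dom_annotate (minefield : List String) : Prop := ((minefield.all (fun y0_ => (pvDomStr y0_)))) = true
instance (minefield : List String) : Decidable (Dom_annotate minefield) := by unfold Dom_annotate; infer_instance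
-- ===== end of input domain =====

-- B replaces A's per-empty-cell 3x3 gather by a validate-then-scatter pass (each bomb bumps a
-- counts dictionary for its in-bounds neighbours) plus a rendering pass; equal output on all
-- valid boards (Pre_), a genuinely different traversal of the same cost.
-- Row strings are accumulated as List Char and wrapped by String.ofList at the end (Lean's own
-- String.append is kernel-opaque); a Python raise is ported as Option none, defaulted outside Pre_.

-- ===== PORT A =====
def countAdjacentBombs (minefield : List String) (i j : Int) : Int :=
  ((([(-1 : Int), 0, 1]).flatMap (fun ii =>
      ([(-1 : Int), 0, 1]).flatMap (fun jj =>
        if 0 ≤ i + ii ∧ i + ii < PySem.List.len minefield then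
          if 0 ≤ j + jj ∧ j + jj < PySem.Str.len (PySem.List.pyGetD minefield 0 "") then
            [decide (PySem.List.pyGetD (PySem.List.pyGetD minefield (i + ii) "").toList (j + jj) ' ' = '*')]
          else []
        else []))).map (fun b => if b then (1 : Int) else 0)).sum

def annotateRowA (minefield : List String) (columnCount : Int) (row : Int) : Option (List Char) :=
  (PySem.List.pyRange 0 columnCount 1).foldl
    (fun acc col => acc.bind (fun rowText =>
      let elem := PySem.List.pyGetD (PySem.List.pyGetD minefield row "").toList col ' '
      if elem = '*' then some (rowText ++ ['*'])
      else if elem = ' ' then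
        let bombCount := countAdjacentBombs minefield row col
        some (rowText ++ (if bombCount > 0 then PySem.Int.toChars bombCount else [' ']))
      else none))
    (some [])

def annotate (minefield : List String) : List String :=
  if minefield = [] then []
  else
    let rowCount := PySem.List.len minefield
    let columnCount := PySem.Str.len (PySem.List.pyGetD minefield 0 "")
    ((PySem.List.pyRange 0 rowCount 1).foldl
      (fun acc row => acc.bind (fun out =>
        if columnCount ≠ PySem.Str.len (PySem.List.pyGetD minefield row "") then none
        else (annotateRowA minefield columnCount row).map (fun rowText => out ++ [String.ofList rowText])))
      (some [])).getD []

-- ===== PORT B =====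
def annotate_alt (minefield : List String) : List String :=
  if minefield = [] then []
  else
    let height := PySem.List.len minefield
    let width := PySem.Str.len (PySem.List.pyGetD minefield 0 "")
    if minefield.any (fun row =>
        decide (PySem.Str.len row ≠ width) ||
        row.toList.any (fun ch => !(ch == '*') && !(ch == ' '))) then []   -- raise ValueError
    else
      let counts : PySem.Dict (Int × Int) Int :=
        (PySem.List.pyRange 0 height 1).foldl (fun d i =>
          (PySem.List.pyRange 0 width 1).foldl (fun d j =>
            if PySem.List.pyGetD (PySem.List.pyGetD minefield i "").toList j ' ' = '*' then
              (PySem.List.pyRange (max (i - 1) 0) (min (i + 2) height) 1).foldl (fun d r =>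
                (PySem.List.pyRange (max (j - 1) 0) (min (j + 2) width) 1).foldl (fun d c =>
                  d.insert (r, c) (d.getD (r, c) 0 + 1)) d) d
            else d) d)
          PySem.Dict.empty
      (PySem.List.pyRange 0 height 1).foldl (fun result i =>
        result ++ [String.ofList ((PySem.List.pyRange 0 width 1).foldl (fun chars j =>
          if PySem.List.pyGetD (PySem.List.pyGetD minefield i "").toList j ' ' = '*' then
            chars ++ ['*']
          else
            let n := counts.getD (i, j) 0
            chars ++ (if n > 0 then PySem.Int.toChars n else [' '])) [])]) []

-- ===== PRECONDITION & SPEC =====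
-- Pre_ excludes exactly the invalid boards (a row of different length than the first, or a
-- character other than '*' and ' '), on which A raises (ValueError, or IndexError when a
-- ragged neighbour row is read before its own length check).
def Pre_annotate (minefield : List String) : Prop :=
  (minefield.all (fun row =>
    row.toList.length == (minefield.headD "").toList.length &&
    row.toList.all (fun ch => ch == '*' || ch == ' '))) = true
instance (minefield : List String) : Decidable (Pre_annotate minefield) := by
  unfold Pre_annotate; infer_instance

def pvWitness_annotate : List String := ["* *", "  *", "   "]

def Spec_annotate (minefield : List String) (out : List String) : Prop := out = annotate_alt minefield
instance (minefield : List String) (out : List String) : Decidable (Spec_annotate minefield out) := by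
  unfold Spec_annotate; infer_instance

-- ===== CLAIM (what is proved, stated in full; the proofs are below) =====
def Claim_equal_annotate : Prop := ∀ (minefield : List String), Dom_annotate minefield →
  Pre_annotate minefield → Spec_annotate minefield (annotate minefield)

-- ===== LEMMAS AND PROOFS =====

-- the shared cell read minefield[r][s] (both ports build this very expression)
def pvCell (minefield : List String) (r s : Int) : Char :=
  PySem.List.pyGetD (PySem.List.pyGetD minefield r "").toList s ' '

-- the 3x3 in-bounds block of neighbour positions a bomb at (i, j) bumps
def pvBlock (i j hh ww : Int) : List (Int × Int) :=
  (PySem.List.pyRange (max (i - 1) 0) (min (i + 2) hh) 1).flatMap (fun r =>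
    (PySem.List.pyRange (max (j - 1) 0) (min (j + 2) ww) 1).map (fun s => (r, s)))

-- the flat multiset of neighbour bumps B's dictionary pass performs
def pvBumps (minefield : List String) (hh ww : Int) : List (Int × Int) :=
  (PySem.List.pyRange 0 hh 1).flatMap (fun i =>
    (PySem.List.pyRange 0 ww 1).flatMap (fun j =>
      if pvCell minefield i j = '*' then pvBlock i j hh ww else []))

-- An Option-bind fold whose step always succeeds is the plain fold, wrapped in `some`.
theorem pvOptFold {α β : Type} (l : List β) (f : α → β → Option α) (g : α → β → α)
    (h : ∀ a, ∀ b ∈ l, f a b = some (g a b)) (init : α) :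
    l.foldl (fun acc x => acc.bind (fun t => f t x)) (some init) = some (l.foldl g init) := by
  induction l generalizing init with
  | nil => rfl
  | cons x xs ih =>
    simp only [List.foldl_cons, Option.bind_some, h init x (List.mem_cons_self),
      ih (fun a b hb => h a b (List.mem_cons_of_mem _ hb))]

theorem pvCountFlatMap {α β : Type} [BEq β] [LawfulBEq β] (l : List α) (f : α → List β) (b : β) :
    (l.flatMap f).count b = (l.map (fun x => (f x).count b)).sum := by
  induction l with
  | nil => rfl
  | cons x xs ih => simp [List.count_append, ih]

-- a sum over a range of a function supported (by its guard) on a sub-range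
theorem pvSumRangeGuard (lo hi a b : Int) (g : Int → Nat) :
    ((PySem.List.pyRange lo hi 1).map (fun r => if a ≤ r ∧ r < b then g r else 0)).sum =
    ((PySem.List.pyRange (max lo a) (min hi b) 1).map g).sum := by
  by_cases h : max lo a < min hi b
  · have hx1 : lo ≤ max lo a := le_max_left _ _
    have hx2 : max lo a ≤ min hi b := by omega
    have hx3 : min hi b ≤ hi := by omega
    have hx4 : max lo a ≤ hi := by omega
    rw [PySem.List.pyRange_one_append lo (max lo a) hi hx1 hx4,
      PySem.List.pyRange_one_append (max lo a) (min hi b) hi hx2 hx3]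
    simp only [List.map_append, List.sum_append]
    have h1 : ((PySem.List.pyRange lo (max lo a) 1).map
        (fun r => if a ≤ r ∧ r < b then g r else 0)).sum = 0 := by
      apply List.sum_eq_zero; intro x hx
      simp only [List.mem_map] at hx
      obtain ⟨r, hr, rfl⟩ := hx
      rw [PySem.List.mem_pyRange_one] at hr
      rw [if_neg (by omega)]
    have h3 : ((PySem.List.pyRange (min hi b) hi 1).map
        (fun r => if a ≤ r ∧ r < b then g r else 0)).sum = 0 := by
      apply List.sum_eq_zero; intro x hx
      simp only [List.mem_map] at hx
      obtain ⟨r, hr, rfl⟩ := hx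
      rw [PySem.List.mem_pyRange_one] at hr
      rw [if_neg (by omega)]
    have h2 : ((PySem.List.pyRange (max lo a) (min hi b) 1).map
        (fun r => if a ≤ r ∧ r < b then g r else 0)) =
        ((PySem.List.pyRange (max lo a) (min hi b) 1).map g) := by
      apply List.map_congr_left; intro r hr
      rw [PySem.List.mem_pyRange_one] at hr
      rw [if_pos (by omega)]
    rw [h1, h2, h3]; omega
  · rw [PySem.List.pyRange_one_eq_nil (a := max lo a) (b := min hi b) (by omega)]
    simp only [List.map_nil, List.sum_nil]
    apply List.sum_eq_zero; intro x hx
    simp only [List.mem_map] at hx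
    obtain ⟨r, hr, rfl⟩ := hx
    rw [PySem.List.mem_pyRange_one] at hr
    rw [if_neg (by omega)]

theorem pvCountPair (l : List Int) (r i j : Int) :
    ((l.map (fun s => (r, s))).count (i, j)) = if r = i then l.count j else 0 := by
  induction l with
  | nil => simp
  | cons x xs ih =>
    simp only [List.map_cons, List.count_cons, ih]
    by_cases hr : r = i <;> by_cases hx : x = j <;>
      simp [hr, hx]
  
theorem pvSumDelta (l : List Int) (hl : l.Nodup) (i : Int) (K : Nat) :
    (l.map (fun r => if r = i then K else 0)).sum = if i ∈ l then K else 0 := by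
  induction l with
  | nil => simp
  | cons x xs ih =>
    simp only [List.nodup_cons] at hl
    simp only [List.map_cons, List.sum_cons, ih hl.2, List.mem_cons]
    by_cases hx : x = i
    · subst hx
      simp [hl.1]
    · by_cases hm : i ∈ xs <;> simp [hx, Ne.symm hx, hm]

-- the count of a fixed pair in a rectangular block of range pairs
theorem pvCountBlock (a b c d i j : Int) :
    (((PySem.List.pyRange a b 1).flatMap (fun r =>
        (PySem.List.pyRange c d 1).map (fun s => (r, s)))).count (i, j)) =
    if (a ≤ i ∧ i < b) ∧ (c ≤ j ∧ j < d) then 1 else 0 := by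
  rw [pvCountFlatMap]
  have h1 : ((PySem.List.pyRange a b 1).map
      (fun r => ((PySem.List.pyRange c d 1).map (fun s => (r, s))).count (i, j))) =
      ((PySem.List.pyRange a b 1).map
      (fun r => if r = i then (PySem.List.pyRange c d 1).count j else 0)) := by
    apply List.map_congr_left; intro r _; exact pvCountPair _ r i j
  rw [h1, pvSumDelta _ (PySem.List.nodup_pyRange_one a b) i]
  have hc : (PySem.List.pyRange c d 1).count j = if c ≤ j ∧ j < d then 1 else 0 := by
    by_cases hm : j ∈ PySem.List.pyRange c d 1
    · rw [List.count_eq_one_of_mem (PySem.List.nodup_pyRange_one c d) hm,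
        if_pos (PySem.List.mem_pyRange_one.mp hm)]
    · rw [List.count_eq_zero.mpr hm, if_neg (fun h => hm (PySem.List.mem_pyRange_one.mpr h))]
  simp only [hc, PySem.List.mem_pyRange_one]
  by_cases h1 : a ≤ i ∧ i < b <;> by_cases h2 : c ≤ j ∧ j < d <;> simp [h1, h2]

-- pull a constant guard out of a sum
theorem pvSumIte (l : List Int) (p : Prop) [Decidable p] (f : Int → Nat) :
    ((l.map (fun x => if p then f x else 0)).sum) = if p then (l.map f).sum else 0 := by
  split_ifs with h <;> simp

theorem pvIteDistrib3 (P : Prop) [Decidable P] (a b c : Nat) :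
    (if P then a + (b + c) else 0) =
      (if P then a else 0) + ((if P then b else 0) + (if P then c else 0)) := by
  split_ifs <;> simp

theorem pvRangeTri (t u : Int) (h : u = t + 3) : PySem.List.pyRange t u 1 = [t, t + 1, t + 1 + 1] := by
  subst h
  rw [PySem.List.pyRange_one_cons (by omega), PySem.List.pyRange_one_cons (by omega),
    PySem.List.pyRange_one_cons (by omega), PySem.List.pyRange_one_eq_nil (by omega)]


-- B's nested dictionary loops are one bump-list fold; its lookup is a bump count
theorem pvCountsEq (mf : List String) (hh ww : Int) (p : Int × Int) :
    (((PySem.List.pyRange 0 hh 1).foldl (fun d i =>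
        (PySem.List.pyRange 0 ww 1).foldl (fun d j =>
          if pvCell mf i j = '*' then
            (PySem.List.pyRange (max (i - 1) 0) (min (i + 2) hh) 1).foldl (fun d r =>
              (PySem.List.pyRange (max (j - 1) 0) (min (j + 2) ww) 1).foldl (fun d c =>
                d.insert (r, c) (d.getD (r, c) 0 + 1)) d) d
          else d) d)
        (PySem.Dict.empty : PySem.Dict (Int × Int) Int))).getD p 0 =
      ((pvBumps mf hh ww).count p : Int) := by
  have hstep : ∀ (d : PySem.Dict (Int × Int) Int),
      (PySem.List.pyRange 0 hh 1).foldl (fun d i =>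
        (PySem.List.pyRange 0 ww 1).foldl (fun d j =>
          if pvCell mf i j = '*' then
            (PySem.List.pyRange (max (i - 1) 0) (min (i + 2) hh) 1).foldl (fun d r =>
              (PySem.List.pyRange (max (j - 1) 0) (min (j + 2) ww) 1).foldl (fun d c =>
                d.insert (r, c) (d.getD (r, c) 0 + 1)) d) d
          else d) d) d =
      (pvBumps mf hh ww).foldl (fun d q => d.insert q (d.getD q 0 + 1)) d := by
    intro d
    rw [pvBumps, List.foldl_flatMap]
    apply PySem.List.foldl_congr_mem
    intro acc i _
    rw [List.foldl_flatMap]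
    apply PySem.List.foldl_congr_mem
    intro acc2 j _
    by_cases hb : pvCell mf i j = '*'
    · rw [if_pos hb, if_pos hb, pvBlock, List.foldl_flatMap]
      apply PySem.List.foldl_congr_mem
      intro acc3 r _
      rw [List.foldl_map]
    · rw [if_neg hb, if_neg hb]; rfl
  rw [hstep, PySem.Dict.getD_foldl_insert_add_one, PySem.Dict.getD_empty, zero_add]

-- A's 3x3 gather at an in-bounds cell equals B's bump count there
set_option maxHeartbeats 1000000 in
theorem pvCellCount (mf : List String)
    (hlen : ∀ row ∈ mf, row.toList.length = (mf.headD "").toList.length)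
    (i j : Int) (hi0 : 0 ≤ i) (hi1 : i < (mf.length : Int)) (hj0 : 0 ≤ j)
    (hj1 : j < ((mf.headD "").toList.length : Int)) :
    countAdjacentBombs mf i j =
      ((pvBumps mf (mf.length : Int) ((mf.headD "").toList.length : Int)).count (i, j) : Int) := by
  have hget0 : PySem.List.pyGetD mf 0 "" = mf.headD "" := by
    cases mf <;> simp [PySem.List.pyGetD_zero]
  -- B's bump count reduces to the clamped 3x3 window sum
  have hB : (pvBumps mf (mf.length : Int) ((mf.headD "").toList.length : Int)).count (i, j) =
      ((PySem.List.pyRange (max (i - 1) 0) (min (i + 2) (mf.length : Int)) 1).map (fun r =>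
        ((PySem.List.pyRange (max (j - 1) 0)
            (min (j + 2) ((mf.headD "").toList.length : Int)) 1).map (fun s =>
          if pvCell mf r s = '*' then 1 else 0)).sum)).sum := by
    rw [pvBumps, pvCountFlatMap]
    have e1 : (PySem.List.pyRange 0 (mf.length : Int) 1).map
        (fun i' => ((PySem.List.pyRange 0 ((mf.headD "").toList.length : Int) 1).flatMap (fun j' =>
           if pvCell mf i' j' = '*' then
             pvBlock i' j' (mf.length : Int) ((mf.headD "").toList.length : Int)
           else [])).count (i, j)) =
      (PySem.List.pyRange 0 (mf.length : Int) 1).map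
        (fun i' => if i - 1 ≤ i' ∧ i' < i + 2 then
            ((PySem.List.pyRange 0 ((mf.headD "").toList.length : Int) 1).map (fun j' =>
              if j - 1 ≤ j' ∧ j' < j + 2 then
                (if pvCell mf i' j' = '*' then 1 else 0) else 0)).sum
          else 0) := by
      apply List.map_congr_left
      intro i' hi'
      rw [PySem.List.mem_pyRange_one] at hi'
      rw [pvCountFlatMap]
      have e2 : (PySem.List.pyRange 0 ((mf.headD "").toList.length : Int) 1).map
          (fun j' => ((if pvCell mf i' j' = '*' then
              pvBlock i' j' (mf.length : Int) ((mf.headD "").toList.length : Int)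
            else []).count (i, j))) =
        (PySem.List.pyRange 0 ((mf.headD "").toList.length : Int) 1).map
          (fun j' => if i - 1 ≤ i' ∧ i' < i + 2 then
            (if j - 1 ≤ j' ∧ j' < j + 2 then
              (if pvCell mf i' j' = '*' then 1 else 0) else 0) else 0) := by
        apply List.map_congr_left
        intro j' hj'
        rw [PySem.List.mem_pyRange_one] at hj'
        by_cases hb : pvCell mf i' j' = '*'
        · rw [if_pos hb, pvBlock, pvCountBlock]
          split_ifs <;> first | rfl | omega
        · rw [if_neg hb, List.count_nil]
          split_ifs <;> simp
      rw [e2, pvSumIte]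
    rw [e1, pvSumRangeGuard 0 (mf.length : Int) (i - 1) (i + 2)]
    have e3 : (PySem.List.pyRange (max 0 (i - 1)) (min (mf.length : Int) (i + 2)) 1).map
        (fun i' => ((PySem.List.pyRange 0 ((mf.headD "").toList.length : Int) 1).map (fun j' =>
              if j - 1 ≤ j' ∧ j' < j + 2 then
                (if pvCell mf i' j' = '*' then 1 else 0) else 0)).sum) =
      (PySem.List.pyRange (max 0 (i - 1)) (min (mf.length : Int) (i + 2)) 1).map
        (fun i' => ((PySem.List.pyRange (max (j - 1) 0)
            (min (j + 2) ((mf.headD "").toList.length : Int)) 1).map (fun s =>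
          if pvCell mf i' s = '*' then 1 else 0)).sum) := by
      apply List.map_congr_left
      intro r _
      rw [pvSumRangeGuard 0 ((mf.headD "").toList.length : Int) (j - 1) (j + 2),
        max_comm 0 (j - 1), min_comm ((mf.headD "").toList.length : Int) (j + 2)]
    rw [e3, max_comm 0 (i - 1), min_comm (mf.length : Int) (i + 2)]
  -- A's 3x3 gather reduces to the same window sum
  have hA : countAdjacentBombs mf i j =
      (((PySem.List.pyRange (max (i - 1) 0) (min (i + 2) (mf.length : Int)) 1).map (fun r =>
        ((PySem.List.pyRange (max (j - 1) 0)
            (min (j + 2) ((mf.headD "").toList.length : Int)) 1).map (fun s =>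
          (if pvCell mf r s = '*' then 1 else 0 : Nat))).sum)).sum : Int) := by
    rw [countAdjacentBombs]
    simp only [PySem.List.len_eq, hget0, PySem.Str.len_eq]
    rw [PySem.List.sum_map_ite_one_zero (fun b => b)]
    norm_cast
    rw [← pvSumRangeGuard (i - 1) (i + 2) 0 (mf.length : Int)]
    have e4 : (PySem.List.pyRange (i - 1) (i + 2) 1).map
        (fun r => if 0 ≤ r ∧ r < (mf.length : Int) then
          ((PySem.List.pyRange (max (j - 1) 0)
              (min (j + 2) ((mf.headD "").toList.length : Int)) 1).map (fun s =>
            (if pvCell mf r s = '*' then 1 else 0 : Nat))).sum else 0) =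
      (PySem.List.pyRange (i - 1) (i + 2) 1).map
        (fun r => if 0 ≤ r ∧ r < (mf.length : Int) then
          ((PySem.List.pyRange (j - 1) (j + 2) 1).map (fun s =>
            if 0 ≤ s ∧ s < ((mf.headD "").toList.length : Int) then
              (if pvCell mf r s = '*' then 1 else 0 : Nat) else 0)).sum else 0) := by
      apply List.map_congr_left
      intro r _
      rw [pvSumRangeGuard (j - 1) (j + 2) 0 ((mf.headD "").toList.length : Int),
        max_comm (j - 1) 0, min_comm (j + 2) ((mf.headD "").toList.length : Int)]
    rw [e4, pvRangeTri (i - 1) (i + 2) (by ring)]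
    simp only [pvRangeTri (j - 1) (j + 2) (by ring)]
    simp only [List.flatMap_cons, List.flatMap_nil, List.append_nil, List.countP_append,
      List.map_cons, List.map_nil, List.sum_cons, List.sum_nil,
      apply_ite (List.countP (fun b => b)), List.countP_nil, List.countP_cons,
      decide_eq_true_eq, add_zero, zero_add, pvCell]
    simp only [pvIteDistrib3, show Int.negSucc 0 = -1 from rfl]
    ring_nf
  rw [hA, hB]

-- ===== VERDICT (by name: the statement is the Claim_ definition above) =====
theorem annotate_spec : Claim_equal_annotate := by
  intro mf hdom hpre
  unfold Spec_annotate
  by_cases hmf : mf = []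
  · subst hmf; rfl
  unfold Pre_annotate at hpre
  simp only [List.all_eq_true, Bool.and_eq_true, beq_iff_eq, Bool.or_eq_true] at hpre
  have hlen : ∀ row ∈ mf, row.toList.length = (mf.headD "").toList.length :=
    fun row hr => (hpre row hr).1
  have hch : ∀ row ∈ mf, ∀ ch ∈ row.toList, ch = '*' ∨ ch = ' ' :=
    fun row hr ch hc => (hpre row hr).2 ch hc
  have hget0 : PySem.List.pyGetD mf 0 "" = mf.headD "" := by
    cases mf <;> simp [PySem.List.pyGetD_zero]
  have hfoldcell : ∀ r s : Int,
      PySem.List.pyGetD (PySem.List.pyGetD mf r "").toList s ' ' = pvCell mf r s :=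
    fun _ _ => rfl
  have hrowlen : ∀ r : Int, 0 ≤ r → r < (mf.length : Int) →
      (PySem.List.pyGetD mf r "").toList.length = (mf.headD "").toList.length := by
    intro r h0 h1
    rw [PySem.List.pyGetD_eq_getElem mf "" h0 h1]
    exact hlen _ (List.getElem_mem _)
  have hcellsOK : ∀ r s : Int, 0 ≤ r → r < (mf.length : Int) → 0 ≤ s →
      s < ((mf.headD "").toList.length : Int) →
      pvCell mf r s = '*' ∨ pvCell mf r s = ' ' := by
    intro r s h0 h1 h2 h3
    have hrow : PySem.List.pyGetD mf r "" = mf[r.toNat] :=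
      PySem.List.pyGetD_eq_getElem mf "" h0 h1
    have hmem : mf[r.toNat] ∈ mf := List.getElem_mem _
    have hlr : (mf[r.toNat]).toList.length = (mf.headD "").toList.length := hlen _ hmem
    have hcell : pvCell mf r s = (mf[r.toNat]).toList[s.toNat] := by
      rw [pvCell, hrow]
      exact PySem.List.pyGetD_eq_getElem _ ' ' h2 (by rw [hlr]; exact_mod_cast h3)
    rw [hcell]
    exact hch _ hmem _ (List.getElem_mem _)
  -- A's per-row Option fold always succeeds and is the plain character fold
  have hrowA : ∀ row : Int, 0 ≤ row → row < (mf.length : Int) →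
      annotateRowA mf ((mf.headD "").toList.length : Int) row =
      some ((PySem.List.pyRange 0 ((mf.headD "").toList.length : Int) 1).foldl
        (fun text col =>
          if pvCell mf row col = '*' then text ++ ['*']
          else text ++ (if countAdjacentBombs mf row col > 0 then
            PySem.Int.toChars (countAdjacentBombs mf row col) else [' '])) []) := by
    intro row h0 h1
    rw [annotateRowA]
    apply pvOptFold
    intro text col hcol
    rw [PySem.List.mem_pyRange_one] at hcol
    rcases hcellsOK row col h0 h1 hcol.1 hcol.2 with hstar | hspace
    · simp [hfoldcell, hstar]
    · simp only [hfoldcell, hspace]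
      rfl
  -- A's outer Option fold always succeeds
  have hA : annotate mf = (PySem.List.pyRange 0 (mf.length : Int) 1).foldl
      (fun out row => out ++ [String.ofList
        ((PySem.List.pyRange 0 ((mf.headD "").toList.length : Int) 1).foldl
          (fun text col =>
            if pvCell mf row col = '*' then text ++ ['*']
            else text ++ (if countAdjacentBombs mf row col > 0 then
              PySem.Int.toChars (countAdjacentBombs mf row col) else [' '])) [])]) [] := by
    rw [annotate, if_neg hmf]
    simp only [PySem.List.len_eq, hget0, PySem.Str.len_eq]
    rw [pvOptFold _ _ (fun out row => out ++ [String.ofList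
        ((PySem.List.pyRange 0 ((mf.headD "").toList.length : Int) 1).foldl
          (fun text col =>
            if pvCell mf row col = '*' then text ++ ['*']
            else text ++ (if countAdjacentBombs mf row col > 0 then
              PySem.Int.toChars (countAdjacentBombs mf row col) else [' '])) [])]) ?_ []]
    · rfl
    intro out row hrow
    rw [PySem.List.mem_pyRange_one] at hrow
    rw [if_neg (by rw [hrowlen row hrow.1 hrow.2]; exact fun h => h rfl),
      hrowA row hrow.1 hrow.2]
    rfl
  -- B: validation passes, the dictionary lookups are bump counts, the folds coincide
  have hvalid : mf.any (fun row =>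
      decide (PySem.Str.len row ≠ PySem.Str.len (PySem.List.pyGetD mf 0 "")) ||
      row.toList.any (fun ch => !(ch == '*') && !(ch == ' '))) = false := by
    rw [List.any_eq_false]
    intro row hr
    have h2 : row.toList.any (fun ch => !(ch == '*') && !(ch == ' ')) = false := by
      rw [List.any_eq_false]
      intro ch hc
      rcases hch row hr ch hc with h | h <;> simp [h]
    have h3 : row.length = (PySem.List.pyGetD mf 0 "").length := by
      rw [hget0, ← String.length_toList, ← String.length_toList]
      exact hlen row hr
    simp [h3, h2]
  rw [hA, annotate_alt, if_neg hmf, if_neg (by rw [hvalid]; exact Bool.false_ne_true)]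
  simp only [PySem.List.len_eq, hget0, PySem.Str.len_eq, hfoldcell, pvCountsEq]
  apply PySem.List.foldl_congr_mem
  intro acc row hrow
  rw [PySem.List.mem_pyRange_one] at hrow
  have hinner : ∀ (chars : List Char), ∀ col ∈ PySem.List.pyRange 0 ((mf.headD "").toList.length : Int) 1,
      (if pvCell mf row col = '*' then chars ++ ['*']
        else chars ++ (if countAdjacentBombs mf row col > 0 then
          PySem.Int.toChars (countAdjacentBombs mf row col) else [' '])) =
      (if pvCell mf row col = '*' then chars ++ ['*']
        else chars ++ (if ((pvBumps mf (mf.length : Int) ((mf.headD "").toList.length : Int)).count (row, col) : Int) > 0 then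
          PySem.Int.toChars ((pvBumps mf (mf.length : Int) ((mf.headD "").toList.length : Int)).count (row, col) : Int) else [' '])) := by
    intro chars col hcol
    rw [PySem.List.mem_pyRange_one] at hcol
    rw [← pvCellCount mf hlen row col hrow.1 hrow.2 hcol.1 hcol.2]
  rw [PySem.List.foldl_congr_mem _ _ _ _ hinner]
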